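-- pv_equiv track=rewrite | github.com/chastis/UniversityStuff | Semester_8/ComputerAlgebra/Lab1/main.py | get_cartesian_all
-- ===== SOURCE A (Python) =====
-- import math
--
-- def get_divisors(a: int) -> list:
--     ans = []
--     a = abs(a)
--     for i in range(1, int(math.sqrt(a)) + 1):
--         if a % i == 0:
--             ans.append(i)
--             ans.append(-i)
--             if a != i*i:
--                 ans.append(a // i)
--                 ans.append(-a // i)
--     return ans
--
-- def to_list_of_lists(a: list) -> list:
--     for i in range(len(a)):
--         a[i] = [a[i]]
--     return a
--
-- def get_cartesian(a: list, b: list) -> list: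
--     ans = []
--     for i in range(len(a)):
--         for j in range(len(b)):
--             ans.append(a[i] + b[j])
--     return ans
--
-- def get_cartesian_all(f_values: list) -> list:
--     divisors = []
--     for value in f_values:
--         if not divisors:
--             divisors = [get_divisors(value)]
--         else:
--             divisors.append(get_divisors(value))
--     ans = to_list_of_lists(divisors[0])
--     for i in range(1, len(divisors)):
--         ans = get_cartesian(ans, to_list_of_lists(divisors[i]))
--     return ans
-- ===== SOURCE B (Python) =====
-- import math
--
-- def _divisors(a):
--     a = abs(a)
--     out = []
--     i = 1
--     while i * i <= a:
--         if a % i == 0: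
--             out.append(i)
--             out.append(-i)
--             if i * i != a:
--                 q = a // i
--                 out.append(q)
--                 out.append(-q)
--         i += 1
--     return out
--
-- def get_cartesian_all(f_values: list) -> list:
--     lists = [_divisors(v) for v in f_values]
--     if not lists:
--         return [[]]
--     ans = []
--     def rec(k, prefix):
--         if k == len(lists):
--             ans.append(prefix.copy())
--             return
--         for d in lists[k]:
--             prefix.append(d)
--             rec(k + 1, prefix)
--             prefix.pop()
--     rec(0, [])
--     return ans
-- ===== Notes on version B (the rewrite author's own statement) =====
-- stated objective: alternative
-- what changed: Replaces the iterative pairwise-cartesian fold (repeatedly combining an accumulated table with the next divisor list) by a recursive backtracking generator that extends a shared prefix through the divisor lists and emits a copy at the leaves; Pre_ excludes only the empty list, on which A raises IndexError.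
import Mathlib
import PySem

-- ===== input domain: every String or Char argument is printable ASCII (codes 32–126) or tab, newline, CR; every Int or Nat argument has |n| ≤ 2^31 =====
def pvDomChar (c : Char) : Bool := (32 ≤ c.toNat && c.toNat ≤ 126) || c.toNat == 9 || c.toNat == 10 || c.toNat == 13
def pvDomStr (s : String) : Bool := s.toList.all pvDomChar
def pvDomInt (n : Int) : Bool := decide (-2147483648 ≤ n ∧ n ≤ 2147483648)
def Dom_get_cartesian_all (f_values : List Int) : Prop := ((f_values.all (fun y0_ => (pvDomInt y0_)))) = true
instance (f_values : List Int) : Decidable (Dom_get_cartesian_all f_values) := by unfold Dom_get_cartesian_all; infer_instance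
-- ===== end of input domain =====

-- B is an alternative decomposition: a recursive backtracking product generator instead of A's
-- iterative pairwise-cartesian fold; same cost, different decomposition (return value only).

-- ===== PORT A =====
-- int(math.sqrt(a)) = Nat.sqrt on the domain |a| ≤ 2^31 (float sqrt is exact there)
def get_divisors (a : Int) : List Int :=
  let n := a.natAbs
  (List.range' 1 (Nat.sqrt n)).foldl
    (fun ans i =>
      if n % i == 0 then
        let ans := ans ++ [(i : Int), -(i : Int)]
        if n ≠ i * i then ans ++ [((n / i : Nat) : Int), -((n / i : Nat) : Int)] else ans
      else ans) []

def to_list_of_lists (a : List Int) : List (List Int) :=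
  a.map (fun x => [x])

def get_cartesian (a b : List (List Int)) : List (List Int) :=
  a.foldl (fun ans x => b.foldl (fun ans y => ans ++ [x ++ y]) ans) []

def get_cartesian_all (f_values : List Int) : List (List Int) :=
  let divisors := f_values.foldl
    (fun d v => if d.isEmpty then [get_divisors v] else d ++ [get_divisors v]) []
  match divisors with
  | [] => []   -- Python raises IndexError at divisors[0]; excluded by Pre_
  | d0 :: rest =>
    rest.foldl (fun ans di => get_cartesian ans (to_list_of_lists di)) (to_list_of_lists d0)

-- ===== PORT B =====
-- while loop of _divisors: i = k + 1 so the counter starts at 1 and termination is structural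
def divsGo (n k : Nat) (out : List Int) : List Int :=
  if _h : (k + 1) * (k + 1) ≤ n then
    divsGo n (k + 1)
      (out ++
        (if n % (k + 1) == 0 then
           [((k + 1 : Nat) : Int), -((k + 1 : Nat) : Int)] ++
             (if (k + 1) * (k + 1) ≠ n then
                [((n / (k + 1) : Nat) : Int), -((n / (k + 1) : Nat) : Int)] else [])
         else []))
  else out
termination_by n - k
decreasing_by
  have : k + 1 ≤ (k + 1) * (k + 1) := Nat.le_mul_of_pos_left _ (Nat.succ_pos k)
  omega

def divisors_alt (a : Int) : List Int := divsGo a.natAbs 0 []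

-- rec(k, prefix): emit prefix at the leaves, otherwise extend by each divisor of lists[k]
def prodRec (lists : List (List Int)) (pre : List Int) : List (List Int) :=
  match lists with
  | [] => [pre]
  | L :: rest => L.flatMap (fun d => prodRec rest (pre ++ [d]))

def get_cartesian_all_alt (f_values : List Int) : List (List Int) :=
  let lists := f_values.map divisors_alt
  match lists with
  | [] => [[]]
  | _ => prodRec lists []

-- ===== PRECONDITION & SPEC =====
-- Pre_ excludes only the empty list, on which A raises IndexError indexing the first divisor list.
def Pre_get_cartesian_all (f_values : List Int) : Prop := f_values ≠ []
instance (f_values : List Int) : Decidable (Pre_get_cartesian_all f_values) := by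
  unfold Pre_get_cartesian_all; infer_instance

def pvWitness_get_cartesian_all : List Int := ([4, 6] : List Int)

def Spec_get_cartesian_all (f_values : List Int) (out : List (List Int)) : Prop :=
  out = get_cartesian_all_alt f_values
instance (f_values : List Int) (out : List (List Int)) : Decidable (Spec_get_cartesian_all f_values out) := by
  unfold Spec_get_cartesian_all; infer_instance

-- ===== CLAIM (what is proved, stated in full; the proofs are below) =====
def Claim_equal_get_cartesian_all : Prop :=
  ∀ (f_values : List Int), Dom_get_cartesian_all f_values →
    Pre_get_cartesian_all f_values →
    Spec_get_cartesian_all f_values (get_cartesian_all f_values)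

-- ===== LEMMAS AND PROOFS =====

-- the divisor chunk contributed by a single candidate i
def divChunk (n i : Nat) : List Int :=
  if n % i == 0 then
    [(i : Int), -(i : Int)] ++
      (if n ≠ i * i then [((n / i : Nat) : Int), -((n / i : Nat) : Int)] else [])
  else []

lemma get_divisors_fold (n : Nat) (l : List Nat) (acc : List Int) :
    l.foldl
      (fun ans i =>
        if n % i == 0 then
          let ans := ans ++ [(i : Int), -(i : Int)]
          if n ≠ i * i then ans ++ [((n / i : Nat) : Int), -((n / i : Nat) : Int)] else ans
        else ans) acc = acc ++ l.flatMap (divChunk n) := by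
  induction l generalizing acc with
  | nil => simp
  | cons i l ih =>
    simp only [List.foldl_cons, List.flatMap_cons, ih]
    unfold divChunk
    split_ifs <;> simp

lemma divsGo_eq (n k : Nat) (out : List Int) :
    divsGo n k out = out ++ (List.range' (k + 1) (Nat.sqrt n - k)).flatMap (divChunk n) := by
  by_cases h : (k + 1) * (k + 1) ≤ n
  · have hk : k + 1 ≤ Nat.sqrt n := Nat.le_sqrt.mpr h
    rw [divsGo]
    have hr : Nat.sqrt n - k = (Nat.sqrt n - (k + 1)) + 1 := by omega
    rw [hr, List.range'_succ, List.flatMap_cons]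
    rw [divsGo_eq n (k + 1)]
    unfold divChunk
    have hne : (n ≠ (k+1) * (k+1)) = ((k+1) * (k+1) ≠ n) := by
      simp [ne_comm]
    split_ifs with h1 h2 h2 <;> simp_all
  · have hk : Nat.sqrt n ≤ k := by
      by_contra hc
      exact h (Nat.le_sqrt.mp (by omega))
    rw [divsGo]
    simp [h, Nat.sub_eq_zero_of_le hk]
termination_by n - k
decreasing_by
  have : k + 1 ≤ (k + 1) * (k + 1) := Nat.le_mul_of_pos_left _ (Nat.succ_pos k)
  omega

lemma divisors_eq (a : Int) : get_divisors a = divisors_alt a := by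
  unfold get_divisors divisors_alt
  rw [divsGo_eq, get_divisors_fold]
  simp

-- building the list of divisor lists: the foldl with the isEmpty branch is just map
lemma build_divisors (l : List Int) (acc : List (List Int)) :
    l.foldl (fun d v => if d.isEmpty then [get_divisors v] else d ++ [get_divisors v]) acc
      = acc ++ l.map get_divisors := by
  induction l generalizing acc with
  | nil => simp
  | cons v l ih =>
    simp only [List.foldl_cons, List.map_cons, ih]
    cases acc <;> simp

lemma get_cartesian_eq (a b : List (List Int)) :
    get_cartesian a b = a.flatMap (fun x => b.map (fun y => x ++ y)) := by
  unfold get_cartesian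
  have inner : ∀ (x : List Int) (acc : List (List Int)),
      b.foldl (fun ans y => ans ++ [x ++ y]) acc = acc ++ b.map (fun y => x ++ y) := by
    intro x acc
    induction b generalizing acc with
    | nil => simp
    | cons y b ih => simp [ih]
  have outer : ∀ (acc : List (List Int)),
      a.foldl (fun ans x => b.foldl (fun ans y => ans ++ [x ++ y]) ans) acc
        = acc ++ a.flatMap (fun x => b.map (fun y => x ++ y)) := by
    intro acc
    induction a generalizing acc with
    | nil => simp
    | cons x a ih => simp [inner, List.flatMap]

  simpa using outer []

-- the fold of pairwise products, started from any accumulator, is the backtracking product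
lemma fold_cartesian (rest : List (List Int)) (acc : List (List Int)) :
    rest.foldl (fun ans di => get_cartesian ans (to_list_of_lists di)) acc
      = acc.flatMap (fun row => prodRec rest row) := by
  induction rest generalizing acc with
  | nil => simp [prodRec]
  | cons L rest ih =>
    simp only [List.foldl_cons, ih, prodRec]
    rw [get_cartesian_eq]
    simp [to_list_of_lists, List.flatMap_assoc, List.flatMap_map]

-- ===== VERDICT (by name: the statement is the Claim_ definition above) =====
theorem get_cartesian_all_spec : Claim_equal_get_cartesian_all := by
  intro f_values _ hpre
  unfold Spec_get_cartesian_all get_cartesian_all get_cartesian_all_alt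
  rw [build_divisors]
  cases f_values with
  | nil => exact absurd rfl hpre
  | cons v vs =>
    simp only [List.nil_append, List.map_cons]
    rw [fold_cartesian]
    have hmap : List.map get_divisors vs = List.map divisors_alt vs := by simp [divisors_eq]
    rw [hmap]
    simp [to_list_of_lists, prodRec, divisors_eq, List.flatMap_map]
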